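-- pv_equiv track=rewrite | github.com/himanshu7118/Ineuron_assignments | Python_basic_programming_assignment_11.py | unmatch_word
-- ===== SOURCE A (Python) =====
-- def unmatch_word(str1,str2):
--   data1 = str1.split(' ')
--   data2 = str2.split(' ')
--   comman_words = {}
--   for word in data1:
--     comman_words[word] = comman_words.get(word, 0) + 1
--   for word in data2:
--     comman_words[word] = comman_words.get(word, 0) + 1
--
--   return [i for i,j in comman_words.items() if j == 1]
-- ===== SOURCE B (Python) =====
-- def unmatch_word(str1, str2):
--     words = str1.split(' ') + str2.split(' ')
--     sw = sorted(words)
--     dups = {sw[i] for i in range(1, len(sw)) if sw[i] == sw[i - 1]}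
--     return [w for w in words if w not in dups]
-- ===== Notes on version B (the rewrite author's own statement) =====
-- stated objective: alternative
-- what changed: Replaces the two dict-counting passes and items() scan with sort-then-adjacent-duplicate detection: sort the concatenated word list, collect words equal to their sorted neighbour as the duplicate set, and keep the words outside it.
import Mathlib
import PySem

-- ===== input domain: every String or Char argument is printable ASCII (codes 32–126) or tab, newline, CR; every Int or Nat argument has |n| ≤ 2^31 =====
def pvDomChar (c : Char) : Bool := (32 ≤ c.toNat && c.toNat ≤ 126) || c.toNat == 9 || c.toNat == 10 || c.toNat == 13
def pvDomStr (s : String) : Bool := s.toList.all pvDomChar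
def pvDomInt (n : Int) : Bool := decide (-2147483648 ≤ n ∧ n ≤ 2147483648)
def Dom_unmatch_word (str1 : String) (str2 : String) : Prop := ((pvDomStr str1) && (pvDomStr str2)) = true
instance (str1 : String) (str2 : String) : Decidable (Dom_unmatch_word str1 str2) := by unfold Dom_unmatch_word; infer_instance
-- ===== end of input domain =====

-- B sorts the concatenated word list and detects duplicates as equal adjacent sorted
-- neighbours instead of building a frequency dictionary; objective: alternative algorithm.

-- ===== PORT A =====
def unmatch_word (str1 : String) (str2 : String) : List String :=
  let data1 := ((PySem.Str.split? str1 " ").getD [])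
  let data2 := ((PySem.Str.split? str2 " ").getD [])
  let comman_words : PySem.Dict String Int := PySem.Dict.empty
  let comman_words := data1.foldl (fun d word => d.insert word (d.getD word 0 + 1)) comman_words
  let comman_words := data2.foldl (fun d word => d.insert word (d.getD word 0 + 1)) comman_words
  (comman_words.items.filter (fun ij => ij.2 == 1)).map (·.1)

-- ===== PORT B =====
def unmatch_word_alt (str1 : String) (str2 : String) : List String :=
  let words := ((PySem.Str.split? str1 " ").getD []) ++ ((PySem.Str.split? str2 " ").getD [])
  let sw := PySem.List.sorted words (fun x => x) false
  let dups : PySem.Set String := PySem.Set.ofList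
    (((PySem.List.pyRange 1 sw.length 1).filter
        (fun i => PySem.List.pyGetD sw i "" == PySem.List.pyGetD sw (i - 1) "")).map
      (fun i => PySem.List.pyGetD sw i ""))
  words.filter (fun w => !(PySem.Set.contains dups w))

-- ===== PRECONDITION & SPEC =====
def Spec_unmatch_word (str1 : String) (str2 : String) (out : List String) : Prop := out = unmatch_word_alt str1 str2
instance (str1 : String) (str2 : String) (out : List String) : Decidable (Spec_unmatch_word str1 str2 out) := by unfold Spec_unmatch_word; infer_instance

-- ===== CLAIM (what is proved, stated in full; the proofs are below) =====
def Claim_equal_unmatch_word : Prop := ∀ (str1 : String) (str2 : String), Dom_unmatch_word str1 str2 → Spec_unmatch_word str1 str2 (unmatch_word str1 str2)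

-- ===== LEMMAS AND PROOFS =====

-- Filtering the first-occurrence dedup by a predicate that only holds for elements
-- occurring at most once equals filtering the original list; generalized over the
-- foldl accumulator.
theorem filter_foldl_add {α : Type} [BEq α] [LawfulBEq α]
    (xs : List α) (p : α → Bool) :
    ∀ (s : List α), (∀ x ∈ xs, p x = true → x ∉ s ∧ xs.count x ≤ 1) →
      (xs.foldl PySem.Set.add s).filter p = s.filter p ++ xs.filter p := by
  induction xs with
  | nil => intro s _; simp
  | cons x xs ih =>
    intro s h
    have hx := h x (by simp)
    simp only [List.foldl_cons]
    have hstep : (PySem.Set.add s x).filter p = s.filter p ++ [x].filter p := by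
      by_cases hmem : x ∈ s
      · rw [PySem.Set.add_of_mem hmem]
        have hpx : p x = false := by
          by_contra hc
          have := (hx (by simpa using (Bool.not_eq_false (p x)).mp hc)).1
          exact this hmem
        simp [hpx]
      · rw [PySem.Set.add_of_not_mem hmem, List.filter_append]
    rw [ih (PySem.Set.add s x) ?_, hstep]
    · simp [List.filter_cons]
      by_cases hpx : p x = true <;> simp [hpx]
    · intro y hy hpy
      obtain ⟨hys, hcnt⟩ := h y (by simp [hy]) hpy
      have hyx : y ≠ x := by
        intro he; subst he
        have : 1 ≤ xs.count y := List.one_le_count_iff.mpr hy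
        simp [List.count_cons_self] at hcnt
        omega
      constructor
      · intro hmem
        rcases (PySem.Set.mem_add s x y).mp hmem with h1 | h2
        · exact hys h1
        · exact hyx h2
      · simp [List.count_cons] at hcnt ⊢
        omega

theorem filter_ofList {α : Type} [BEq α] [LawfulBEq α]
    (xs : List α) (p : α → Bool) (h : ∀ x ∈ xs, p x = true → xs.count x ≤ 1) :
    (PySem.Set.ofList xs).filter p = xs.filter p := by
  rw [PySem.Set.ofList_eq_foldl, filter_foldl_add xs p [] ?_]
  · simp
  · intro x hx hp; exact ⟨by simp, h x hx hp⟩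

-- an adjacent equal pair gives count ≥ 2
theorem two_le_count_of_adj {α : Type} [BEq α] [LawfulBEq α]
    (s : List α) (k : Nat) (hk1 : 1 ≤ k) (hk : k < s.length)
    (he : s[k] = s[k - 1]'(by omega)) : 2 ≤ s.count (s[k]) := by
  have hdrop : s.drop (k - 1) = s[k - 1]'(by omega) :: s[k] :: s.drop (k + 1) := by
    rw [List.drop_eq_getElem_cons (by omega)]
    congr 1
    rw [show k - 1 + 1 = k from by omega, List.drop_eq_getElem_cons hk]
  have hsub : (s.drop (k - 1)).count (s[k]) ≤ s.count (s[k]) :=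
    (List.drop_sublist _ _).count_le _
  rw [hdrop, ← he] at hsub
  rw [List.count_cons_self, List.count_cons_self] at hsub
  omega

-- in a ≤-sorted list, count ≥ 2 forces an adjacent equal pair
theorem adj_of_two_le_count {α : Type} [BEq α] [LawfulBEq α] [LinearOrder α]
    (s : List α) (w : α) (hp : s.Pairwise (· ≤ ·)) (hc : 2 ≤ s.count w) :
    ∃ k : Nat, 1 ≤ k ∧ k < s.length ∧ s[k]? = some w ∧ s[k - 1]? = some w := by
  induction s with
  | nil => simp at hc
  | cons a t ih =>
    rcases List.pairwise_cons.mp hp with ⟨hat, hpt⟩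
    by_cases haw : a = w
    · subst haw
      have hmem : a ∈ t := by
        have hcc : List.count a (a :: t) = List.count a t + 1 := List.count_cons_self
        exact List.one_le_count_iff.mp (by omega)
      cases t with
      | nil => simp at hmem
      | cons b t' =>
        have hb : b = a := by
          rcases List.mem_cons.mp hmem with h | h
          · exact h.symm
          · have h1 : a ≤ b := hat b (by simp)
            have h2 : b ≤ a := (List.pairwise_cons.mp hpt).1 a h
            exact le_antisymm h2 h1
        exact ⟨1, le_refl 1, by simp, by simp [hb], by simp⟩
    · have hct : 2 ≤ t.count w := by
        simpa [List.count_cons, haw] using hc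
      obtain ⟨k, hk1, hklen, hgk, hgk1⟩ := ih hpt hct
      refine ⟨k + 1, by omega, by simpa using Nat.succ_lt_succ hklen, ?_, ?_⟩
      · simpa using hgk
      · rw [show k + 1 - 1 = k from rfl, show k = (k - 1) + 1 from by omega,
          List.getElem?_cons_succ]
        exact hgk1

-- membership in B's adjacent-duplicate list ↔ count ≥ 2, for a ≤-sorted list
theorem mem_dupList_iff (s : List String) (hp : s.Pairwise (· ≤ ·)) (w : String) :
    (w ∈ ((PySem.List.pyRange 1 s.length 1).filter
        (fun i => PySem.List.pyGetD s i "" == PySem.List.pyGetD s (i - 1) "")).map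
      (fun i => PySem.List.pyGetD s i "")) ↔ 2 ≤ s.count w := by
  constructor
  · rintro hmem
    simp only [List.mem_map, List.mem_filter, PySem.List.mem_pyRange_one] at hmem
    obtain ⟨i, ⟨⟨hi1, hilen⟩, heq⟩, hval⟩ := hmem
    set k : Nat := i.toNat with hk
    have hik : i = (k : Int) := by omega
    have hklt : k < s.length := by omega
    have hk1 : 1 ≤ k := by omega
    rw [hik] at heq hval
    rw [show ((k : Int) - 1) = ((k - 1 : Nat) : Int) from by omega,
      PySem.List.pyGetD_natCast, PySem.List.pyGetD_natCast] at heq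
    rw [PySem.List.pyGetD_natCast] at hval
    simp only [List.getD_eq_getElem?_getD, List.getElem?_eq_getElem hklt,
      List.getElem?_eq_getElem (show k - 1 < s.length by omega), Option.getD_some] at heq hval
    have he : s[k] = s[k - 1]'(by omega) := by simpa using heq
    have := two_le_count_of_adj s k hk1 hklt he
    rwa [hval] at this
  · intro hc
    obtain ⟨k, hk1, hklen, hgk, hgk1⟩ := adj_of_two_le_count s w hp hc
    simp only [List.mem_map, List.mem_filter, PySem.List.mem_pyRange_one]
    refine ⟨(k : Int), ⟨⟨by omega, by omega⟩, ?_⟩, ?_⟩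
    · rw [show (k : Int) - 1 = ((k - 1 : Nat) : Int) from by omega,
        PySem.List.pyGetD_natCast, PySem.List.pyGetD_natCast]
      simp only [List.getD_eq_getElem?_getD, hgk, hgk1]
      simp
    · rw [PySem.List.pyGetD_natCast]
      simp [List.getD_eq_getElem?_getD, hgk]

-- ===== VERDICT (by name: the statement is the Claim_ definition above) =====
theorem unmatch_word_spec : Claim_equal_unmatch_word := by
  intro str1 str2 _
  unfold Spec_unmatch_word unmatch_word unmatch_word_alt
  simp only []
  set ws := ((PySem.Str.split? str1 " ").getD []) ++ ((PySem.Str.split? str2 " ").getD []) with hws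
  -- A's two insert-folds build counter ws; its list comprehension filters the dedup
  rw [← List.foldl_append, ← hws, PySem.Dict.foldl_insert_getD_add_one_eq_counter,
      PySem.Dict.items_counter]
  rw [List.filter_map, List.map_map]
  have hpred : ((fun ij : String × Int => ij.2 == 1) ∘ fun k => (k, (ws.count k : Int)))
      = fun k => PySem.List.count ws k == 1 := by
    funext k
    simp [PySem.List.count_eq, Function.comp]
  rw [hpred]
  have hcomp : ((fun ij : String × Int => ij.1) ∘ fun k => (k, (ws.count k : Int))) = id := by
    funext k; rfl
  rw [hcomp, List.map_id]
  rw [filter_ofList ws _ (by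
    intro x _ hp
    have : ws.count x = 1 := by
      simpa [PySem.List.count_eq] using hp
    omega)]
  -- B's side: membership in the adjacent-duplicate set of the sorted list
  set sw := PySem.List.sorted ws (fun x => x) false with hsw
  have hperm : sw.Perm ws := PySem.List.sorted_perm ws (fun x => x) false
  have hpair : sw.Pairwise (· ≤ ·) := by
    simpa using PySem.List.sorted_pairwise ws (fun x => x)
  apply (List.filter_congr ?_).symm
  intro w hw
  have hmem_iff := mem_dupList_iff sw hpair w
  have hcount : sw.count w = ws.count w := hperm.count_eq w
  have h1 : 1 ≤ ws.count w := List.one_le_count_iff.mpr hw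
  by_cases h2 : 2 ≤ ws.count w
  · have hmem : w ∈ PySem.Set.ofList (((PySem.List.pyRange 1 sw.length 1).filter
        (fun i => PySem.List.pyGetD sw i "" == PySem.List.pyGetD sw (i - 1) "")).map
      (fun i => PySem.List.pyGetD sw i "")) :=
      (PySem.Set.mem_ofList _ _).mpr (hmem_iff.mpr (by omega))
    simp [hmem, PySem.List.count_eq]
    omega
  · have hnmem : ¬ w ∈ PySem.Set.ofList (((PySem.List.pyRange 1 sw.length 1).filter
        (fun i => PySem.List.pyGetD sw i "" == PySem.List.pyGetD sw (i - 1) "")).map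
      (fun i => PySem.List.pyGetD sw i "")) := by
      rw [PySem.Set.mem_ofList, hmem_iff]
      omega
    simp [hnmem, PySem.List.count_eq]
    omega
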